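-- pv_equiv track=rewrite | github.com/MINOS-DAC26/MINOS | src/partitioning/partition.py | find_balanced_dimensions
-- ===== SOURCE A (Python) =====
-- import math
--
-- def find_balanced_dimensions(total_chips):
--     best_x, best_y = 1, total_chips
--     for i in range(1, int(math.sqrt(total_chips)) + 1):
--         if total_chips % i == 0:
--             j = total_chips // i
--             if abs(i - j) < abs(best_x - best_y):
--                 best_x, best_y = i, j
--     return best_x, best_y
-- ===== SOURCE B (Python) =====
-- import math
--
-- def find_balanced_dimensions(total_chips):
--     for i in range(math.isqrt(total_chips), 0, -1):
--         if total_chips % i == 0: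
--             return i, total_chips // i
--     return 1, total_chips
-- ===== Notes on version B (the rewrite author's own statement) =====
-- stated objective: simpler
-- what changed: Replaces the upward scan with a running best pair by a downward scan from isqrt(n) that returns at the first divisor found, since the largest divisor not exceeding sqrt(n) already gives the most balanced pair; no comparison or best-tracking state remains.
import Mathlib
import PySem

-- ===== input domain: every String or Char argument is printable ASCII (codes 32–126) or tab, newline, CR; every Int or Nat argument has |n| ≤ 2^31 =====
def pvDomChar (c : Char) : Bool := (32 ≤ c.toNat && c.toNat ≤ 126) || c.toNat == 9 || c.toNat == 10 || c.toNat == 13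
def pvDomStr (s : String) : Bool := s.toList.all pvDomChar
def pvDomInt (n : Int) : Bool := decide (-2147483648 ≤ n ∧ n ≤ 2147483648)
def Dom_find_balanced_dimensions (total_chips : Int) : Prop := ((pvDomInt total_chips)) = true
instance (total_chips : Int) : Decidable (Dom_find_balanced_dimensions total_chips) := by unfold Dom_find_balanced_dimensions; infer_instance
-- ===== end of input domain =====

-- B replaces A's upward scan with a best-so-far pair by a downward scan from isqrt(n) returning
-- at the first divisor found (the largest divisor ≤ √n already gives the most balanced pair): simpler.


-- ===== PORT A =====
-- int(math.sqrt(n)) is exactly Nat.sqrt n on the domain (0 ≤ n ≤ 2^31: the double conversion and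
-- sqrt are exact/correctly rounded there); for n < 0 math.sqrt raises ValueError (excluded by Pre_).
def find_balanced_dimensions (total_chips : Int) : Int × Int :=
  (PySem.List.pyRange 1 (((Int.toNat total_chips).sqrt : Int) + 1) 1).foldl
    (fun best i =>
      if PySem.Int.mod total_chips i = 0 then
        let j := PySem.Int.floordiv total_chips i
        if |i - j| < |best.1 - best.2| then (i, j) else best
      else best)
    (1, total_chips)

-- ===== PORT B =====
-- the for-loop 'for i in range(isqrt(n), 0, -1)' as a downward structural recursion on i
def altGo (n : Int) : Nat → Int × Int
  | 0 => (1, n)                       -- loop fell through: return 1, total_chips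
  | k + 1 =>
      if PySem.Int.mod n ((k : Int) + 1) = 0 then
        ((k : Int) + 1, PySem.Int.floordiv n ((k : Int) + 1))
      else altGo n k

-- math.isqrt = Nat.sqrt; raises ValueError for n < 0 (excluded by Pre_)
def find_balanced_dimensions_alt (total_chips : Int) : Int × Int :=
  altGo total_chips (Int.toNat total_chips).sqrt

-- ===== PRECONDITION & SPEC =====
-- Pre_ excludes exactly the negative inputs, on which A raises ValueError (math.sqrt of a negative).
def Pre_find_balanced_dimensions (total_chips : Int) : Prop := 0 ≤ total_chips
instance (total_chips : Int) : Decidable (Pre_find_balanced_dimensions total_chips) := by unfold Pre_find_balanced_dimensions; infer_instance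
def pvWitness_find_balanced_dimensions : Int := 12

def Spec_find_balanced_dimensions (total_chips : Int) (out : Int × Int) : Prop := out = find_balanced_dimensions_alt total_chips
instance (total_chips : Int) (out : Int × Int) : Decidable (Spec_find_balanced_dimensions total_chips out) := by unfold Spec_find_balanced_dimensions; infer_instance

-- ===== CLAIM (what is proved, stated in full; the proofs are below) =====
def Claim_equal_find_balanced_dimensions : Prop := ∀ (total_chips : Int), Dom_find_balanced_dimensions total_chips → Pre_find_balanced_dimensions total_chips → Spec_find_balanced_dimensions total_chips (find_balanced_dimensions total_chips)

-- ===== LEMMAS AND PROOFS =====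

-- greatest divisor of N in [1, k] (1 if none, in particular for k = 0)
def dmax (N : Nat) : Nat → Nat
  | 0 => 1
  | k + 1 => if N % (k + 1) = 0 then k + 1 else dmax N k

theorem dmax_dvd (N : Nat) : ∀ k, dmax N k ∣ N := by
  intro k
  induction k with
  | zero => simp [dmax]
  | succ k ih =>
      simp only [dmax]
      split
      · exact Nat.dvd_of_mod_eq_zero ‹_›
      · exact ih

theorem dmax_pos (N : Nat) : ∀ k, 0 < dmax N k := by
  intro k
  induction k with
  | zero => simp [dmax]
  | succ k ih => simp only [dmax]; split <;> omega

theorem dmax_le (N : Nat) : ∀ k, dmax N k ≤ max 1 k := by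
  intro k
  induction k with
  | zero => simp [dmax]
  | succ k ih => simp only [dmax]; split <;> omega

theorem altGo_eq (N : Nat) : ∀ k, altGo (N : Int) k = ((dmax N k : Int), ((N / dmax N k : Nat) : Int)) := by
  intro k
  induction k with
  | zero => simp [altGo, dmax]
  | succ k ih =>
      have hcast : ((k : Int) + 1) = ((k + 1 : Nat) : Int) := by push_cast; ring
      simp only [altGo, dmax, hcast, PySem.Int.mod_natCast, PySem.Int.floordiv_natCast]
      split
      · rename_i h
        have : N % (k + 1) = 0 := by exact_mod_cast h
        simp [this]
      · rename_i h
        have : ¬ N % (k + 1) = 0 := fun hc => h (by exact_mod_cast hc)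
        simp [this, ih]

-- the body of A's loop
def loopA (n : Int) (best : Int × Int) (i : Int) : Int × Int :=
  if PySem.Int.mod n i = 0 then
    let j := PySem.Int.floordiv n i
    if |i - j| < |best.1 - best.2| then (i, j) else best
  else best

theorem foldA_eq (N : Nat) (hN : 1 ≤ N) :
    ∀ k, k ≤ Nat.sqrt N →
      (PySem.List.pyRange 1 ((k : Int) + 1) 1).foldl (loopA (N : Int)) (1, (N : Int)) =
        ((dmax N k : Int), ((N / dmax N k : Nat) : Int)) := by
  intro k
  induction k with
  | zero =>
      intro _
      rw [show ((0 : Nat) : Int) + 1 = 1 by norm_num, PySem.List.pyRange_one_eq_nil (by norm_num)]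
      simp [dmax]
  | succ k ih =>
      intro hk
      have hk' : k ≤ Nat.sqrt N := Nat.le_of_succ_le hk
      have hsplit : PySem.List.pyRange 1 (((k + 1 : Nat) : Int) + 1) 1 =
          PySem.List.pyRange 1 ((k : Int) + 1) 1 ++ [((k : Int) + 1)] := by
        have := PySem.List.pyRange_one_succ_right (a := 1) (b := (k : Int) + 1) (by omega)
        rw [show (((k + 1 : Nat) : Int) + 1) = ((k : Int) + 1) + 1 by push_cast; ring, this]
      rw [hsplit, List.foldl_append, ih hk']
      simp only [List.foldl_cons, List.foldl_nil, loopA]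
      have hcast : ((k : Int) + 1) = ((k + 1 : Nat) : Int) := by push_cast; ring
      rw [hcast, PySem.Int.mod_natCast, PySem.Int.floordiv_natCast]
      by_cases hdiv : N % (k + 1) = 0
      · -- k+1 divides N: it becomes the new (and larger) best divisor
        have hddvd := dmax_dvd N k
        have hdpos := dmax_pos N k
        have hdle := dmax_le N k
        set d := dmax N k with hd
        have hidvd : (k + 1) ∣ N := Nat.dvd_of_mod_eq_zero hdiv
        have hsq : (k + 1) * (k + 1) ≤ N := Nat.le_sqrt.mp hk
        have hile : k + 1 ≤ N / (k + 1) :=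
          (Nat.le_div_iff_mul_le (by omega)).mpr hsq
        have hdsq : d * d ≤ N := by
          calc d * d ≤ (k + 1) * (k + 1) := Nat.mul_le_mul (by omega) (by omega)
            _ ≤ N := hsq
        have hdle2 : d ≤ N / d := (Nat.le_div_iff_mul_le hdpos).mpr hdsq
        rcases Nat.eq_zero_or_pos k with hk0 | hkpos
        · -- i = 1: the initial best (1, N) is already (1, N/1); no strict improvement
          subst hk0
          have hd1 : d = 1 := by simp [hd, dmax]
          have hc : ((N % (0 + 1) : Nat) : Int) = 0 := by simp [hdiv]
          rw [if_pos hc, hd1]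
          simp [dmax, hdiv]
        · -- k ≥ 1: d ≤ k < k+1, so (k+1, N/(k+1)) strictly improves
          have hdlt : d < k + 1 := by omega
          have hNd : N / d * d = N := Nat.div_mul_cancel hddvd
          have hNi : N / (k + 1) * (k + 1) = N := Nat.div_mul_cancel hidvd
          have hipos : 0 < N / (k + 1) :=
            Nat.div_pos (Nat.le_of_dvd (by omega) hidvd) (by omega)
          have hgt : N / (k + 1) < N / d := by
            by_contra hle
            rw [not_lt] at hle
            have : N / d * d < N / (k + 1) * (k + 1) :=
              Nat.mul_lt_mul_of_le_of_lt hle hdlt hipos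
            omega
          have hile' : ((k + 1 : Nat) : Int) ≤ ((N / (k + 1) : Nat) : Int) := by exact_mod_cast hile
          have hdle2' : ((d : Nat) : Int) ≤ ((N / d : Nat) : Int) := by exact_mod_cast hdle2
          have habs1 : |((k + 1 : Nat) : Int) - ((N / (k + 1) : Nat) : Int)| =
              ((N / (k + 1) : Nat) : Int) - ((k + 1 : Nat) : Int) := by
            rw [abs_sub_comm]; exact abs_of_nonneg (by omega)
          have habs2 : |((d : Nat) : Int) - ((N / d : Nat) : Int)| =
              ((N / d : Nat) : Int) - ((d : Nat) : Int) := by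
            rw [abs_sub_comm]; exact abs_of_nonneg (by omega)
          have hlt : |((k + 1 : Nat) : Int) - ((N / (k + 1) : Nat) : Int)| <
              |((d : Nat) : Int) - ((N / d : Nat) : Int)| := by
            rw [habs1, habs2]
            have h1 : N / (k + 1) + d + 1 ≤ N / d + k := by omega
            have h2 : ((N / (k + 1) : Nat) : Int) + (d : Int) + 1 ≤ ((N / d : Nat) : Int) + (k : Int) := by
              exact_mod_cast h1
            omega
          have hc : ((N % (k + 1) : Nat) : Int) = 0 := by simp [hdiv]
          rw [if_pos hc, if_pos hlt]
          simp [dmax, hdiv]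
      · -- k+1 does not divide N: state unchanged
        have hc : ¬ ((N % (k + 1) : Nat) : Int) = 0 := fun hc => hdiv (by exact_mod_cast hc)
        rw [if_neg hc]
        simp [dmax, hdiv]

-- ===== VERDICT (by name: the statement is the Claim_ definition above) =====
theorem find_balanced_dimensions_spec : Claim_equal_find_balanced_dimensions := by
  intro n _ hpre
  unfold Spec_find_balanced_dimensions
  obtain ⟨N, rfl⟩ : ∃ N : Nat, n = (N : Int) := ⟨n.toNat, (Int.toNat_of_nonneg hpre).symm⟩
  have hT : ((N : Int)).toNat = N := Int.toNat_natCast N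
  rcases Nat.eq_zero_or_pos N with h0 | hpos
  · subst h0
    simp [find_balanced_dimensions, find_balanced_dimensions_alt, altGo,
      PySem.List.pyRange_one_eq_nil (by norm_num : (1:Int) ≤ 1)]
  · have hA := foldA_eq N hpos (Nat.sqrt N) (le_refl _)
    have hB := altGo_eq N (Nat.sqrt N)
    unfold find_balanced_dimensions find_balanced_dimensions_alt
    rw [hT]
    rw [hB, ← hA]
    rfl
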